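-- pv_equiv track=rewrite | github.com/kellymhli/code-challenges | letter-combos.py | letter_combos
-- ===== SOURCE A (Python) =====
-- def letter_combos(digits) -> list:
--     if not digits:
--         return []
--     d = {'2':'abc', '3':'def', '4':'ghi', '5':'jkl', '6':'mno', '7':'pqrs', '8':'tuv', '9':'wxyz'}
--
--     chars = d.get(digits[0])
--     if len(digits) == 1:
--         if chars:
--             return [t for t in d.get(digits[0])]
--         else:
--             return []
--     if chars:
--         return [t + subs for t in d.get(digits[0]) for subs in letter_combos(digits[1:])]
--     else:
--         return [subs for subs in letter_combos(digits[1:])]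
-- ===== SOURCE B (Python) =====
-- def letter_combos(digits) -> list:
--     if not digits:
--         return []
--     d = {'2':'abc', '3':'def', '4':'ghi', '5':'jkl', '6':'mno', '7':'pqrs', '8':'tuv', '9':'wxyz'}
--     last = d.get(digits[-1])
--     if not last:
--         return []
--     acc = list(last)
--     for c in reversed(digits[:-1]):
--         letters = d.get(c)
--         if letters:
--             acc = [l + s for l in letters for s in acc]
--     return acc
-- ===== Notes on version B (the rewrite author's own statement) =====
-- stated objective: faster
-- what changed: Replaces the recursion that re-evaluates letter_combos(digits[1:]) once per letter of the current key with a single right-to-left loop maintaining one accumulator of suffix combinations, so each suffix is expanded exactly once.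
import Mathlib
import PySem

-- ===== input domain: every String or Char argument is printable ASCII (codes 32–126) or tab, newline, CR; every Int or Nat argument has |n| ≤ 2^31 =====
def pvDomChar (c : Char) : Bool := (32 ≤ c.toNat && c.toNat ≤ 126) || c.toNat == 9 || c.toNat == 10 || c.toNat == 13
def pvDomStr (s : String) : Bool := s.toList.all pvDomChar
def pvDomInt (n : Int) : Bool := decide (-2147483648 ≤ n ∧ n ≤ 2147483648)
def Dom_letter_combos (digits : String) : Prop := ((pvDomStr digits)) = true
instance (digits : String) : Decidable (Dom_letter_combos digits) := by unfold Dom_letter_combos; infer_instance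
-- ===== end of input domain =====

-- B replaces A's recursion (which re-evaluates the suffix call once per letter) by one
-- right-to-left loop with a single accumulator of suffix combinations; objective: faster.

-- shared helper: the literal keypad dict of both Pythons, looked up with d.get
def phoneD : PySem.Dict Char String :=
  PySem.Dict.ofList [('2', "abc"), ('3', "def"), ('4', "ghi"), ('5', "jkl"),
   ('6', "mno"), ('7', "pqrs"), ('8', "tuv"), ('9', "wxyz")]

def phoneGet (c : Char) : Option (List Char) :=
  (PySem.Dict.get? phoneD c).map String.toList

-- ===== PORT A =====
-- A, step for step over the char list; strings built at the end via String.ofList.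
-- The recursive call (lcA rest) sits inside the flatMap lambda, mirroring A's
-- per-letter re-evaluation of letter_combos(digits[1:]).
def lcA : List Char → List (List Char)
  | [] => []
  | c :: rest =>
    let chars := phoneGet c
    if rest.isEmpty then
      match chars with
      | some cs => cs.map (fun t => [t])
      | none => []
    else
      match chars with
      | some cs => cs.flatMap (fun t => (lcA rest).map (fun subs => t :: subs))
      | none => lcA rest

def letter_combos (digits : String) : List String :=
  (lcA digits.toList).map String.ofList

-- ===== PORT B =====
-- one step of B's loop body: acc = [l + s for l in letters for s in acc] when letters maps
def lcBstep (acc : List (List Char)) (c : Char) : List (List Char) :=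
  match phoneGet c with
  | some letters => letters.flatMap (fun l => acc.map (fun s => l :: s))
  | none => acc

def lcB (l : List Char) : List (List Char) :=
  match l.reverse with
  | [] => []
  | lastc :: restRev =>
    match phoneGet lastc with
    | none => []
    | some ls => restRev.foldl lcBstep (ls.map (fun ch => [ch]))

def letter_combos_alt (digits : String) : List String :=
  (lcB digits.toList).map String.ofList

-- ===== PRECONDITION & SPEC =====
def Spec_letter_combos (digits : String) (out : List String) : Prop := out = letter_combos_alt digits
instance (digits : String) (out : List String) : Decidable (Spec_letter_combos digits out) := by unfold Spec_letter_combos; infer_instance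

-- ===== CLAIM (what is proved, stated in full; the proofs are below) =====
def Claim_equal_letter_combos : Prop := ∀ (digits : String), Dom_letter_combos digits → Spec_letter_combos digits (letter_combos digits)

-- ===== LEMMAS AND PROOFS =====

theorem lcBstep_nil (c : Char) : lcBstep [] c = [] := by
  unfold lcBstep
  cases phoneGet c with
  | none => rfl
  | some letters => simp

theorem lcB_cons (c : Char) (rest : List Char) (h : rest ≠ []) :
    lcB (c :: rest) = lcBstep (lcB rest) c := by
  unfold lcB
  obtain ⟨lastc, rr, hrev⟩ : ∃ a l, rest.reverse = a :: l := by
    cases hr : rest.reverse with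
    | nil => exact absurd (List.reverse_eq_nil_iff.mp hr) h
    | cons a l => exact ⟨a, l, rfl⟩
  have : (c :: rest).reverse = lastc :: (rr ++ [c]) := by
    simp [List.reverse_cons, hrev]
  rw [this, hrev]
  cases h : phoneGet lastc with
  | none => simp [h, lcBstep_nil]
  | some ls => simp [h, List.foldl_append]

theorem lcA_eq_lcB (l : List Char) : lcA l = lcB l := by
  induction l with
  | nil => rfl
  | cons c rest ih =>
    cases rest with
    | nil =>
      unfold lcA lcB
      cases h : phoneGet c with
      | none => simp [h]
      | some cs => simp [h]
    | cons r rs =>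
      rw [lcB_cons c (r :: rs) (by simp)]
      unfold lcA lcBstep
      rw [← ih]
      cases phoneGet c with
      | none => simp
      | some cs => simp

-- ===== VERDICT (by name: the statement is the Claim_ definition above) =====
theorem letter_combos_spec : Claim_equal_letter_combos := by
  intro digits _
  unfold Spec_letter_combos letter_combos letter_combos_alt
  rw [lcA_eq_lcB]
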